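-- pv_equiv track=rewrite | github.com/wjy5446/TIL | 1_Programming/Algorithm/string-transformation.py | Transformation_jy
-- ===== SOURCE A (Python) =====
-- def move_char(char, number):
--     ord_char = ord(char)
--     moved_char = (ord_char - 97 +number) % 26 + 97
--     return chr(moved_char)
--
-- def Transformation_jy(string):
--     result = ""
--     dict_char = {}
--     count = 0
--
--     for char in string:
--         # dict 안에 있는 char 확인
--         if (char not in dict_char):
--             dict_char[char] = 1
--         else:
--             count = dict_char[char]
--             dict_char[char] += 1
--
--         tf_char = move_char(char, dict_char[char])
--         result += tf_char
--
--     return result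
-- ===== SOURCE B (Python) =====
-- def move_char(char, number):
--     ord_char = ord(char)
--     moved_char = (ord_char - 97 + number) % 26 + 97
--     return chr(moved_char)
--
-- def Transformation_jy(string):
--     # group-by-character: list each distinct char's positions once; the k-th
--     # occurrence (0-based k) is shifted by k+1; reassemble the output by
--     # sorting the (position, shifted char) pieces back into string order.
--     pieces = []
--     for c in sorted(set(string)):
--         positions = [i for i, ch in enumerate(string) if ch == c]
--         pieces += [(i, move_char(c, k + 1)) for k, i in enumerate(positions)]
--     pieces.sort(key=lambda p: p[0])
--     return "".join(ch for _, ch in pieces)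
-- ===== Notes on version B (the rewrite author's own statement) =====
-- stated objective: alternative
-- what changed: B replaces A's single left-to-right pass with a mutable counter dict by a group-by-character algorithm: for each distinct character it collects all its positions once, shifts the k-th occurrence by k+1, and reassembles the output by sorting the (position, char) pieces back into string order.
import Mathlib
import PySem

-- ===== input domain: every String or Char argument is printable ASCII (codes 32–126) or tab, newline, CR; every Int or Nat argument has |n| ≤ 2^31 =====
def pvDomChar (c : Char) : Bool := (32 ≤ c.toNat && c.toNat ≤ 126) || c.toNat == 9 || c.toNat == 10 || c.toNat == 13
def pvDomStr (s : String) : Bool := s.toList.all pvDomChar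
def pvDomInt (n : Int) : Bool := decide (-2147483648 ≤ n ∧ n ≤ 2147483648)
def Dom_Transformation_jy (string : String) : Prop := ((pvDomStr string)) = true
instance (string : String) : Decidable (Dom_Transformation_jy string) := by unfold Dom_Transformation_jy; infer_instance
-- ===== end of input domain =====

-- B: instead of A's single pass with a mutable counter dict, group positions by distinct
-- character, shift the k-th occurrence by k+1, and sort the pieces back into string order.

-- ===== PORT A =====
-- move_char: (ord(char) - 97 + number) % 26 + 97, then chr
def moveChar (c : Char) (n : Int) : Char :=
  Char.ofNat (PySem.Int.mod ((c.toNat : Int) - 97 + n) 26 + 97).toNat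

-- the loop body of A (the Python local `count` is write-only/dead and is omitted)
def pvAStep (st : List Char × PySem.Dict Char Int) (ch : Char) : List Char × PySem.Dict Char Int :=
  let d' := if st.2.contains ch = false then st.2.insert ch 1
            else st.2.modify ch 0 (· + 1)          -- dict_char[char] += 1
  (st.1 ++ [moveChar ch (d'.getD ch 0)], d')       -- result += move_char(char, dict_char[char])

def Transformation_jy (string : String) : String :=
  String.ofList (string.toList.foldl pvAStep ([], PySem.Dict.empty)).1

-- ===== PORT B =====
-- Source B, step for step: for c in sorted(set(string)) accumulate the pieces of c
-- (positions by one enumerate-filter scan, k-th occurrence shifted by k+1),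
-- then pieces.sort(key=lambda p: p[0]) and join the shifted chars.
def Transformation_jy_alt (string : String) : String :=
  let cs := string.toList
  let pieces := (PySem.List.sorted (PySem.Set.ofList cs) (fun x => x) false).foldl
    (fun acc c =>
      let positions := ((PySem.List.enumerate cs 0).filter (fun p => p.2 == c)).map (·.1)
      acc ++ (PySem.List.enumerate positions 0).map (fun q => (q.2, moveChar c (q.1 + 1))))
    []
  String.ofList ((PySem.List.sorted pieces (fun p => p.1) false).map (·.2))

-- ===== PRECONDITION & SPEC =====
def Spec_Transformation_jy (string : String) (out : String) : Prop := out = Transformation_jy_alt string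
instance (string : String) (out : String) : Decidable (Spec_Transformation_jy string out) := by unfold Spec_Transformation_jy; infer_instance

-- ===== CLAIM (what is proved, stated in full; the proofs are below) =====
def Claim_equal_Transformation_jy : Prop := ∀ (string : String), Dom_Transformation_jy string → Spec_Transformation_jy string (Transformation_jy string)

-- ===== LEMMAS AND PROOFS =====

-- reference tagging: (position, original char, shifted char) for each position,
-- given the already-processed prefix `pre`
def pvTag (pre : List Char) : List Char → List (Int × Char × Char)
  | [] => []
  | c :: rest => ((pre.length : Int), c, moveChar c ((pre.count c : Int) + 1)) :: pvTag (pre ++ [c]) rest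

-- ---- A side: the fold equals the reference ----
lemma pvA_fold (rest : List Char) : ∀ (acc pre : List Char) (d : PySem.Dict Char Int),
    (∀ c, d.getD c 0 = (pre.count c : Int)) →
    (∀ c, d.contains c = decide (pre.count c ≠ 0)) →
    (rest.foldl pvAStep (acc, d)).1 = acc ++ (pvTag pre rest).map (·.2.2) := by
  induction rest with
  | nil => intro acc pre d _ _; simp [pvTag]
  | cons c rest ih =>
    intro acc pre d hD hC
    rw [List.foldl_cons]
    by_cases hc : d.contains c = false
    · have h0 : pre.count c = 0 := by
        have := hC c; rw [hc] at this; simpa using this.symm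
      have hstep : pvAStep (acc, d) c = (acc ++ [moveChar c ((pre.count c : Int) + 1)], d.insert c 1) := by
        simp [pvAStep, hc, PySem.Dict.getD_insert_self, h0]
      have hgetD : ∀ c', (d.insert c 1).getD c' 0 = (((pre ++ [c]).count c' : Nat) : Int) := by
        intro c'
        rw [PySem.Dict.getD_insert]
        by_cases h : c' = c
        · simp [h, List.count_append, h0]
        · simp [h, hD c', List.count_append, Ne.symm h]
      have hcont : ∀ c', (d.insert c 1).contains c' = decide ((pre ++ [c]).count c' ≠ 0) := by
        intro c'
        rw [PySem.Dict.contains_insert]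
        by_cases h : c' = c
        · simp [h, List.count_append]
        · simp [h, hC c', List.count_append, Ne.symm h]
      rw [hstep, ih _ (pre ++ [c]) _ hgetD hcont]
      simp [pvTag]
    · rw [Bool.not_eq_false] at hc
      have hstep : pvAStep (acc, d) c = (acc ++ [moveChar c ((pre.count c : Int) + 1)], d.modify c 0 (· + 1)) := by
        simp [pvAStep, hc, PySem.Dict.getD_modify_self, hD c]
      have hgetD : ∀ c', (d.modify c 0 (· + 1)).getD c' 0 = (((pre ++ [c]).count c' : Nat) : Int) := by
        intro c'
        rw [PySem.Dict.getD_modify]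
        by_cases h : c' = c
        · simp [h, hD c, List.count_append]
        · simp [h, hD c', List.count_append, Ne.symm h]
      have hcont : ∀ c', (d.modify c 0 (· + 1)).contains c' = decide ((pre ++ [c]).count c' ≠ 0) := by
        intro c'
        rw [PySem.Dict.contains_modify]
        by_cases h : c' = c
        · simp [h, List.count_append]
        · simp [h, hC c', List.count_append, Ne.symm h]
      rw [hstep, ih _ (pre ++ [c]) _ hgetD hcont]
      simp [pvTag]

-- ---- B side ----

-- the group of char c, computed by enumerate-filter-enumerate, equals the
-- c-entries of the reference tagging (rank in the positions list = prefix count)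
lemma pvGroup_eq (c : Char) (rest : List Char) : ∀ (pre : List Char),
    (PySem.List.enumerate (((PySem.List.enumerate rest (pre.length : Int)).filter (fun p => p.2 == c)).map (·.1)) ((pre.count c : Nat) : Int)).map
        (fun q => (q.2, moveChar c (q.1 + 1)))
    = ((pvTag pre rest).filter (fun p => p.2.1 == c)).map (fun p => (p.1, p.2.2)) := by
  induction rest with
  | nil => intro pre; simp [pvTag, PySem.List.enumerate_nil]
  | cons c' rest ih =>
    intro pre
    rw [PySem.List.enumerate_cons]
    have hlen : (pre.length : Int) + 1 = (((pre ++ [c']).length : Nat) : Int) := by simp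
    by_cases h : c' = c
    · subst h
      simp only [pvTag, List.filter_cons, beq_self_eq_true, if_pos, List.map_cons]
      rw [PySem.List.enumerate_cons, List.map_cons]
      have hcnt : ((pre.count c' : Nat) : Int) + 1 = (((pre ++ [c']).count c' : Nat) : Int) := by
        simp [List.count_append]
      rw [hlen, hcnt, ih (pre ++ [c'])]
    · have hb : (c' == c) = false := by simp [h]
      have hcnt : ((pre.count c : Nat) : Int) = (((pre ++ [c']).count c : Nat) : Int) := by
        simp [List.count_append, h]
      simp only [pvTag, List.filter_cons, hb, Bool.false_eq_true, if_false]
      rw [hlen, hcnt, ih (pre ++ [c'])]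

-- positions carried by the reference tagging are strictly increasing
lemma pvTag_fst (rest : List Char) : ∀ (pre : List Char),
    (pvTag pre rest).map (·.1) = PySem.List.pyRange (pre.length : Int) ((pre.length : Int) + rest.length) 1 := by
  induction rest with
  | nil => intro pre; simp [pvTag, PySem.List.pyRange_one_eq_nil]
  | cons c rest ih =>
    intro pre
    have hcons : PySem.List.pyRange (pre.length : Int) ((pre.length : Int) + ((rest.length : Int) + 1)) 1
        = (pre.length : Int) :: PySem.List.pyRange ((pre.length : Int) + 1) ((pre.length : Int) + ((rest.length : Int) + 1)) 1 :=
      PySem.List.pyRange_one_cons (by omega)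
    have h2 := ih (pre ++ [c])
    simp only [List.length_append, List.length_cons, List.length_nil] at h2 ⊢
    rw [pvTag, List.map_cons, h2]
    push_cast
    rw [show ((pre.length : Int) + 1 + (rest.length : Int)) = ((pre.length : Int) + ((rest.length : Int) + 1)) by ring]
    rw [hcons]

lemma pvTag_pairwise (rest pre : List Char) :
    (pvTag pre rest).Pairwise (fun a b => a.1 < b.1) := by
  have hp : ((pvTag pre rest).map (·.1)).Pairwise (· < ·) := by
    rw [pvTag_fst rest pre]; exact PySem.List.pairwise_lt_pyRange_one _ _
  exact (List.pairwise_map).mp hp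

-- every tagged entry's original char comes from the tagged suffix
lemma pvTag_mem_char (rest : List Char) : ∀ (pre : List Char) (p : Int × Char × Char),
    p ∈ pvTag pre rest → p.2.1 ∈ rest := by
  induction rest with
  | nil => intro pre p hp; simp [pvTag] at hp
  | cons c rest ih =>
    intro pre p hp
    simp only [pvTag, List.mem_cons] at hp
    rcases hp with h | h
    · simp [h]
    · exact List.mem_cons_of_mem _ (ih (pre ++ [c]) p h)

-- flatMap of per-key filters over a nodup key list covering l is a permutation of l
lemma pvFlatMap_filter_perm {α κ : Type} [DecidableEq κ] [BEq κ] [LawfulBEq κ] (key : α → κ) :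
    ∀ (ds : List κ) (l : List α), ds.Nodup → (∀ x ∈ l, key x ∈ ds) →
    (ds.flatMap (fun c => l.filter (fun x => key x == c))).Perm l := by
  intro ds
  induction ds with
  | nil =>
    intro l _ hcov
    have : l = [] := List.eq_nil_iff_forall_not_mem.mpr (fun x hx => by simpa using hcov x hx)
    simp [this]
  | cons d ds ih =>
    intro l hnd hcov
    rw [List.flatMap_cons]
    have hnd' := List.nodup_cons.mp hnd
    have hrest : ∀ c ∈ ds, (l.filter (fun x => key x == c))
        = ((l.filter (fun x => !(key x == d))).filter (fun x => key x == c)) := by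
      intro c hc
      rw [List.filter_filter]
      apply (List.filter_congr ?_).symm
      intro x _
      by_cases h : key x = c
      · have hcd : ¬ c = d := fun he => hnd'.1 (he ▸ hc)
        simp [h]
        exact hcd
      · simp [h]
    have hmap : ds.flatMap (fun c => l.filter (fun x => key x == c))
        = ds.flatMap (fun c => (l.filter (fun x => !(key x == d))).filter (fun x => key x == c)) :=
      List.flatMap_congr hrest
    rw [hmap]
    have hcov' : ∀ x ∈ l.filter (fun x => !(key x == d)), key x ∈ ds := by
      intro x hx
      have hm := List.mem_filter.mp hx
      have := hcov x hm.1
      rcases List.mem_cons.mp this with h | h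
      · exfalso; revert hm; simp [h]
      · exact h
    have hih := ih (l.filter (fun x => !(key x == d))) hnd'.2 hcov'
    have h1 : (l.filter (fun x => key x == d) ++ ds.flatMap (fun c => (l.filter (fun x => !(key x == d))).filter (fun x => key x == c))).Perm
        (l.filter (fun x => key x == d) ++ l.filter (fun x => !(key x == d))) :=
      hih.append_left _
    exact h1.trans (List.filter_append_perm _ l)

-- B unfolded: B's output is the reference tagging's shifted chars
lemma pvB_eq_tag (cs : List Char) :
    (PySem.List.sorted
      ((PySem.List.sorted (PySem.Set.ofList cs) (fun x => x) false).foldl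
        (fun acc c =>
          acc ++ (PySem.List.enumerate (((PySem.List.enumerate cs 0).filter (fun p => p.2 == c)).map (·.1)) 0).map
            (fun q => (q.2, moveChar c (q.1 + 1)))) [])
      (fun p => p.1) false).map (·.2)
    = (pvTag [] cs).map (·.2.2) := by
  have hgroup : ∀ c, (PySem.List.enumerate (((PySem.List.enumerate cs 0).filter (fun p => p.2 == c)).map (·.1)) 0).map
        (fun q => (q.2, moveChar c (q.1 + 1)))
      = ((pvTag [] cs).filter (fun p => p.2.1 == c)).map (fun p => (p.1, p.2.2)) := by
    intro c
    have := pvGroup_eq c cs []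
    simpa using this
  have hfold : (PySem.List.sorted (PySem.Set.ofList cs) (fun x => x) false).foldl
        (fun acc c =>
          acc ++ (PySem.List.enumerate (((PySem.List.enumerate cs 0).filter (fun p => p.2 == c)).map (·.1)) 0).map
            (fun q => (q.2, moveChar c (q.1 + 1)))) []
      = ((PySem.List.sorted (PySem.Set.ofList cs) (fun x => x) false).flatMap
          (fun c => (pvTag [] cs).filter (fun p => p.2.1 == c))).map (fun p => (p.1, p.2.2)) := by
    rw [PySem.List.foldl_append_eq_flatMap]
    rw [List.map_flatMap]
    simp only [hgroup, List.nil_append]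
  have hnd : (PySem.List.sorted (PySem.Set.ofList cs) (fun x => x) false).Nodup :=
    (PySem.List.sorted_perm _ _ _).nodup_iff.mpr (PySem.Set.nodup_ofList cs)
  have hcov : ∀ p ∈ pvTag [] cs, p.2.1 ∈ PySem.List.sorted (PySem.Set.ofList cs) (fun x => x) false := by
    intro p hp
    rw [PySem.List.mem_sorted]
    rw [PySem.Set.mem_ofList]
    exact pvTag_mem_char cs [] p hp
  have hperm : (((PySem.List.sorted (PySem.Set.ofList cs) (fun x => x) false).flatMap
        (fun c => (pvTag [] cs).filter (fun p => p.2.1 == c))).map (fun p => (p.1, p.2.2))).Perm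
      ((pvTag [] cs).map (fun p => (p.1, p.2.2))) :=
    (pvFlatMap_filter_perm (fun p : Int × Char × Char => p.2.1) _ _ hnd hcov).map _
  have hpw : ((pvTag [] cs).map (fun p => (p.1, p.2.2))).Pairwise (fun a b => a.1 < b.1) := by
    have := pvTag_pairwise cs []
    exact List.pairwise_map.mpr (by simpa using this)
  rw [hfold]
  have hs := PySem.List.sorted_eq_of_perm_of_pairwise_lt _ _ (fun p : Int × Char => p.1) hperm.symm hpw
  rw [hs, List.map_map]
  rfl

-- ===== VERDICT (by name: the statement is the Claim_ definition above) =====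
theorem Transformation_jy_spec : Claim_equal_Transformation_jy := by
  intro s _
  unfold Spec_Transformation_jy Transformation_jy Transformation_jy_alt
  have hA := pvA_fold s.toList [] [] PySem.Dict.empty (by simp) (by simp)
  simp only [List.nil_append] at hA
  rw [hA, ← pvB_eq_tag s.toList]
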